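-- pv_equiv track=rewrite | github.com/spwai/spwai.github.io | db/organize.py | clean_and_sort
-- ===== SOURCE A (Python) =====
-- def clean_and_sort(data_dict):
--     cleaned_data = {}
--     for key, names in data_dict.items():
--         seen_lower = set()
--         unique_names = []
--         for name in names:
--             name_lower = name.lower()
--             if name_lower not in seen_lower:
--                 seen_lower.add(name_lower)
--                 unique_names.append(name)
--         cleaned_data[key] = sorted(unique_names, key=lambda x: x.lower())
--     return cleaned_data
-- ===== SOURCE B (Python) =====
-- def _dedup_sorted(names):
--     out = []
--     for name in sorted(names, key=str.lower):
--         if not out or out[-1].lower() != name.lower():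
--             out.append(name)
--     return out
--
--
-- def clean_and_sort(data_dict):
--     return {key: _dedup_sorted(names) for key, names in data_dict.items()}
-- ===== Notes on version B (the rewrite author's own statement) =====
-- stated objective: alternative
-- what changed: Per key, instead of deduplicating with a seen-set of lowercased names and then sorting, B stably sorts by lowercase first and drops duplicates by comparing each name's lowercase with the last kept element's; the outer dict loop becomes a dict comprehension over a helper. Stability makes the first element of each equal-lowercase run the original first occurrence, so the results coincide.
import Mathlib
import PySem

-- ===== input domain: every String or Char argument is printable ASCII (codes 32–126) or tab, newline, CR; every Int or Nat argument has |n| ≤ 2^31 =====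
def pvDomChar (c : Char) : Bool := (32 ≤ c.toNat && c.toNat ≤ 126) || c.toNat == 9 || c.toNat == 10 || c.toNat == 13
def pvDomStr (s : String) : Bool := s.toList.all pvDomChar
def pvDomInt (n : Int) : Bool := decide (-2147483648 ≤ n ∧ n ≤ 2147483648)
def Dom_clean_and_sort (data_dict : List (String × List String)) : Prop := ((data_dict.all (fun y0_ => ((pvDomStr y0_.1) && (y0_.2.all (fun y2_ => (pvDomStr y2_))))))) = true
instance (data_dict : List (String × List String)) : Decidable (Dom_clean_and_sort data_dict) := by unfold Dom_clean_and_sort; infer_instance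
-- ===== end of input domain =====

-- B replaces A's per-key seen-set dedup-then-sort with a helper that stably sorts by lowercase
-- and drops adjacent duplicate lowercases (comparing with the last kept element), assembled by a
-- dict comprehension (alternative decomposition; same asymptotic cost).

-- ===== PORT A =====
-- dedup by first occurrence of the lowercased name (seen-set + list), then sort by lowercase
def clean_and_sort (data_dict : List (String × List String)) : List (String × List String) :=
  (data_dict.foldl
    (fun (cleaned_data : PySem.Dict String (List String)) kv =>
      let unique_names :=
        (kv.2.foldl
          (fun (st : PySem.Set String × List String) name =>
            let name_lower := PySem.Str.lower name
            if name_lower ∉ st.1 then (PySem.Set.add st.1 name_lower, st.2 ++ [name]) else st)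
          (PySem.Set.empty, [])).2
      cleaned_data.insert kv.1 (PySem.List.sorted unique_names (fun x => PySem.Str.lower x) false))
    PySem.Dict.empty).items

-- ===== PORT B =====
-- helper _dedup_sorted: stable sort by lowercase, then keep a name unless its lowercase equals the
-- last kept element's (Python's 'not out or out[-1].lower() != name.lower()'; out[-1] on a nonempty
-- list is getLast?, the 'out = []' guard mirrors the short-circuit)
def pv_dedup_sorted (names : List String) : List String :=
  (PySem.List.sorted names (fun x => PySem.Str.lower x) false).foldl
    (fun out name =>
      if out = [] ∨ (out.getLast?).map PySem.Str.lower ≠ some (PySem.Str.lower name)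
      then out ++ [name] else out) []

-- dict comprehension {key: _dedup_sorted(names) for key, names in data_dict.items()}
def clean_and_sort_alt (data_dict : List (String × List String)) : List (String × List String) :=
  (PySem.Dict.ofList (data_dict.map (fun kv => (kv.1, pv_dedup_sorted kv.2)))).items

-- ===== PRECONDITION & SPEC =====
def Spec_clean_and_sort (data_dict : List (String × List String)) (out : List (String × List String)) : Prop := out = clean_and_sort_alt data_dict
instance (data_dict : List (String × List String)) (out : List (String × List String)) : Decidable (Spec_clean_and_sort data_dict out) := by unfold Spec_clean_and_sort; infer_instance

-- ===== CLAIM (what is proved, stated in full; the proofs are below) =====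
def Claim_equal_clean_and_sort : Prop := ∀ (data_dict : List (String × List String)), Dom_clean_and_sort data_dict → Spec_clean_and_sort data_dict (clean_and_sort data_dict)

-- ===== LEMMAS AND PROOFS =====

-- the Boolean test "this name's lowercase is k"
def pvKey (k : String) : String → Bool := fun y => decide (PySem.Str.lower y = k)
theorem pvKey_eq_true {k y : String} : pvKey k y = true ↔ PySem.Str.lower y = k := by simp [pvKey]
-- inserting an element with a different lowercase does not change the first hit of key k
theorem pvFind_insertBy_ne (a k : String) (h : PySem.Str.lower a ≠ k) (S : List String) :
    (PySem.List.insertBy (fun x y => decide (PySem.Str.lower x < PySem.Str.lower y)) a S).find? (pvKey k)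
      = S.find? (pvKey k) := by
  induction S with
  | nil =>
    rw [PySem.List.insertBy.eq_1, List.find?_cons_of_neg (by simp [pvKey, h])]
  | cons y ys ih =>
    rw [PySem.List.insertBy.eq_2]
    by_cases hb : PySem.Str.lower a < PySem.Str.lower y
    · rw [if_pos (by simpa using hb), List.find?_cons_of_neg (by simp [pvKey, h])]
    · rw [if_neg (by simpa using hb)]
      by_cases hy : PySem.Str.lower y = k
      · rw [List.find?_cons_of_pos (by simp [pvKey, hy]), List.find?_cons_of_pos (by simp [pvKey, hy])]
      · rw [List.find?_cons_of_neg (by simp [pvKey, hy]), List.find?_cons_of_neg (by simp [pvKey, hy]), ih]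

-- inserting into a sorted list: the first hit of a's own lowercase is the old first hit, else a itself
theorem pvFind_insertBy_self (a : String) (S : List String)
    (hS : S.Pairwise (fun x y => PySem.Str.lower x ≤ PySem.Str.lower y)) :
    (PySem.List.insertBy (fun x y => decide (PySem.Str.lower x < PySem.Str.lower y)) a S).find? (pvKey (PySem.Str.lower a))
      = some ((S.find? (pvKey (PySem.Str.lower a))).getD a) := by
  induction S with
  | nil =>
    rw [PySem.List.insertBy.eq_1, List.find?_cons_of_pos (by simp [pvKey])]
    rfl
  | cons y ys ih =>
    rw [PySem.List.insertBy.eq_2]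
    by_cases hb : PySem.Str.lower a < PySem.Str.lower y
    · rw [if_pos (by simpa using hb), List.find?_cons_of_pos (by simp [pvKey])]
      have hy : ¬ pvKey (PySem.Str.lower a) y = true := by
        simp only [pvKey_eq_true]; exact fun he => absurd he.symm (ne_of_lt hb)
      rw [List.find?_cons_of_neg hy]
      have hys : ys.find? (pvKey (PySem.Str.lower a)) = none := by
        apply List.find?_eq_none.mpr
        intro z hz
        simp only [pvKey_eq_true]
        intro he
        have := (List.pairwise_cons.mp hS).1 z hz
        exact absurd (he ▸ this) (not_le.mpr hb)
      rw [hys]; rfl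
    · rw [if_neg (by simpa using hb)]
      by_cases hy : PySem.Str.lower y = PySem.Str.lower a
      · rw [List.find?_cons_of_pos (by simp [pvKey, hy]), List.find?_cons_of_pos (by simp [pvKey, hy])]
        rfl
      · rw [List.find?_cons_of_neg (by simp [pvKey, hy]), List.find?_cons_of_neg (by simp [pvKey, hy]),
          ih hS.of_cons]

-- STABILITY: the first element with a given lowercase is the same before and after sorting
theorem pvSorted_find (L : List String) (k : String) :
    (PySem.List.sorted L (fun x => PySem.Str.lower x) false).find? (pvKey k) = L.find? (pvKey k) := by
  induction L using List.reverseRecOn with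
  | nil => rfl
  | append_singleton L a ih =>
    rw [PySem.List.sorted_eq_foldl_insertBy, List.foldl_append, List.foldl_cons, List.foldl_nil,
      ← PySem.List.sorted_eq_foldl_insertBy, List.find?_append, ← ih]
    by_cases hk : PySem.Str.lower a = k
    · subst hk
      rw [pvFind_insertBy_self a _ (PySem.List.sorted_pairwise L (fun x => PySem.Str.lower x))]
      cases hf : (PySem.List.sorted L (fun x => PySem.Str.lower x) false).find? (pvKey (PySem.Str.lower a)) with
      | none => simp [List.find?_cons_of_pos (by simp [pvKey] : pvKey (PySem.Str.lower a) a = true)]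
      | some y => simp
    · rw [pvFind_insertBy_ne a k hk]
      have : List.find? (pvKey k) [a] = none := by
        rw [List.find?_cons_of_neg (by simp [pvKey, hk])]; rfl
      rw [this]
      simp

-- A's inner loop, seen set written as plain append (pointwise equal to the port's step)
def pvAStep (st : List String × List String) (name : String) : List String × List String :=
  if PySem.Str.lower name ∉ st.1 then (st.1 ++ [PySem.Str.lower name], st.2 ++ [name]) else st

-- A's dedup: x is kept iff it is the first name with its lowercase
theorem pvAFold_mem (L : List String) : ∀ (s u : List String),
    (∀ k, k ∈ s ↔ ∃ y ∈ u, PySem.Str.lower y = k) → ∀ x,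
    (x ∈ (L.foldl pvAStep (s, u)).2 ↔
      x ∈ u ∨ (PySem.Str.lower x ∉ s ∧ L.find? (pvKey (PySem.Str.lower x)) = some x)) := by
  induction L with
  | nil => intro s u _ x; simp
  | cons a L ih =>
    intro s u hinv x
    rw [List.foldl_cons]
    by_cases ha : PySem.Str.lower a ∈ s
    · rw [show pvAStep (s, u) a = (s, u) by simp [pvAStep, ha]]
      rw [ih s u hinv x]
      by_cases hx : PySem.Str.lower x ∈ s
      · simp [hx]
      · have hne : ¬ pvKey (PySem.Str.lower x) a = true := by
          simp only [pvKey_eq_true]; intro he; exact hx (he ▸ ha)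
        rw [List.find?_cons_of_neg hne]
    · rw [show pvAStep (s, u) a = (s ++ [PySem.Str.lower a], u ++ [a]) by simp [pvAStep, ha]]
      have hinv' : ∀ k, k ∈ s ++ [PySem.Str.lower a] ↔ ∃ y ∈ u ++ [a], PySem.Str.lower y = k := by
        intro k
        simp only [List.mem_append, List.mem_singleton, hinv k]
        constructor
        · rintro (⟨y, hy, he⟩ | hk)
          · exact ⟨y, Or.inl hy, he⟩
          · exact ⟨a, Or.inr rfl, hk.symm⟩
        · rintro ⟨y, hy | rfl, he⟩
          · exact Or.inl ⟨y, hy, he⟩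
          · exact Or.inr he.symm
      rw [ih _ _ hinv' x]
      by_cases hxa : PySem.Str.lower x = PySem.Str.lower a
      · by_cases hxe : x = a
        · subst hxe
          simp only [List.mem_append, List.mem_singleton, or_true, true_or, true_iff]
          right
          exact ⟨ha, List.find?_cons_of_pos (by simp [pvKey])⟩
        · constructor
          · rintro (hu | ⟨hns, _⟩)
            · rcases List.mem_append.mp hu with h1 | h2
              · exact Or.inl h1
              · exact absurd (List.mem_singleton.mp h2) hxe
            · exact absurd (List.mem_append.mpr (Or.inr (by simp [hxa]))) hns
          · rintro (hu | ⟨hns, hf⟩)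
            · exact Or.inl (List.mem_append.mpr (Or.inl hu))
            · rw [List.find?_cons_of_pos (by simp [pvKey, hxa])] at hf
              exact absurd (Option.some_injective _ hf).symm hxe
      · have hne : ¬ pvKey (PySem.Str.lower x) a = true := by
          simp only [pvKey_eq_true]; exact fun h => hxa h.symm
        rw [List.find?_cons_of_neg hne]
        have hmem : (PySem.Str.lower x ∈ s ++ [PySem.Str.lower a]) ↔ PySem.Str.lower x ∈ s := by
          simp [hxa]
        have hmu : (x ∈ u ++ [a]) ↔ x ∈ u := by
          constructor
          · intro h
            rcases List.mem_append.mp h with h1 | h2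
            · exact h1
            · exact absurd (congrArg PySem.Str.lower (List.mem_singleton.mp h2)) hxa
          · intro h; exact List.mem_append.mpr (Or.inl h)
        rw [hmem, hmu]

-- A's dedup keeps pairwise-distinct lowercases
theorem pvAFold_nodup (L : List String) : ∀ (s u : List String),
    (u.map PySem.Str.lower).Nodup → (∀ z ∈ u, PySem.Str.lower z ∈ s) →
    ((L.foldl pvAStep (s, u)).2.map PySem.Str.lower).Nodup := by
  induction L with
  | nil => intro s u hnd _; simpa using hnd
  | cons a L ih =>
    intro s u hnd hsub
    rw [List.foldl_cons]
    by_cases ha : PySem.Str.lower a ∈ s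
    · rw [show pvAStep (s, u) a = (s, u) by simp [pvAStep, ha]]
      exact ih s u hnd hsub
    · rw [show pvAStep (s, u) a = (s ++ [PySem.Str.lower a], u ++ [a]) by simp [pvAStep, ha]]
      apply ih
      · rw [List.map_append]
        refine List.Nodup.append hnd (by simp) ?_
        intro z hz
        simp only [List.map_singleton, List.mem_singleton]
        rcases List.mem_map.mp hz with ⟨y, hy, rfl⟩
        intro he
        exact ha (he ▸ hsub y hy)
      · intro z hz
        rcases List.mem_append.mp hz with h1 | h2
        · exact List.mem_append.mpr (Or.inl (hsub z h1))
        · rw [List.mem_singleton.mp h2]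
          exact List.mem_append.mpr (Or.inr (by simp))

-- prev-tracking form of B's inner dedup (pointwise equal to pv_dedup_sorted's step, see pvBLast)
def pvBStep (st : Option String × List String) (name : String) : Option String × List String :=
  if some (PySem.Str.lower name) ≠ st.1 then (some (PySem.Str.lower name), st.2 ++ [name]) else st

-- B's dedup on a sorted input: x is kept iff it is the first element with its lowercase
theorem pvBFold_mem (S : List String) : ∀ (prev : Option String) (out : List String),
    S.Pairwise (fun x y => PySem.Str.lower x ≤ PySem.Str.lower y) →
    (∀ p, prev = some p → ∀ y ∈ S, p ≤ PySem.Str.lower y) → ∀ x,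
    (x ∈ (S.foldl pvBStep (prev, out)).2 ↔
      x ∈ out ∨ (S.find? (pvKey (PySem.Str.lower x)) = some x ∧ prev ≠ some (PySem.Str.lower x))) := by
  induction S with
  | nil => intro prev out _ _ x; simp
  | cons a S ih =>
    intro prev out hS hprev x
    rw [List.foldl_cons]
    by_cases hskip : some (PySem.Str.lower a) = prev
    · rw [show pvBStep (prev, out) a = (prev, out) by simp [pvBStep, hskip]]
      have hprev' : ∀ p, prev = some p → ∀ y ∈ S, p ≤ PySem.Str.lower y :=
        fun p hp y hy => hprev p hp y (List.mem_cons_of_mem a hy)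
      rw [ih prev out hS.of_cons hprev' x]
      by_cases hxa : PySem.Str.lower x = PySem.Str.lower a
      · have h1 : prev = some (PySem.Str.lower x) := by rw [hxa]; exact hskip.symm
        simp [h1]
      · have hne : ¬ pvKey (PySem.Str.lower x) a = true := by
          simp only [pvKey_eq_true]; exact fun h => hxa h.symm
        rw [List.find?_cons_of_neg hne]
    · rw [show pvBStep (prev, out) a = (some (PySem.Str.lower a), out ++ [a]) by simp [pvBStep, hskip]]
      have hprev' : ∀ p, some (PySem.Str.lower a) = some p → ∀ y ∈ S, p ≤ PySem.Str.lower y := by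
        rintro p hp y hy
        cases Option.some_injective _ hp
        exact (List.pairwise_cons.mp hS).1 y hy
      rw [ih _ _ hS.of_cons hprev' x]
      by_cases hxa : PySem.Str.lower x = PySem.Str.lower a
      · by_cases hxe : x = a
        · subst hxe
          simp only [List.mem_append, List.mem_singleton, or_true, true_or, true_iff]
          right
          refine ⟨List.find?_cons_of_pos (by simp [pvKey]), fun h => hskip (by rw [← hxa]; exact h.symm)⟩
        · constructor
          · rintro (hu | ⟨hf, hne⟩)
            · rcases List.mem_append.mp hu with h1 | h2
              · exact Or.inl h1
              · exact absurd (List.mem_singleton.mp h2) hxe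
            · exact absurd (congrArg some hxa.symm) hne
          · rintro (hu | ⟨hf, _⟩)
            · exact Or.inl (List.mem_append.mpr (Or.inl hu))
            · rw [List.find?_cons_of_pos (by simp [pvKey, hxa])] at hf
              exact absurd (Option.some_injective _ hf).symm hxe
      · have hne : ¬ pvKey (PySem.Str.lower x) a = true := by
          simp only [pvKey_eq_true]; exact fun h => hxa h.symm
        rw [List.find?_cons_of_neg hne]
        have hmu : (x ∈ out ++ [a]) ↔ x ∈ out := by
          constructor
          · intro h
            rcases List.mem_append.mp h with h1 | h2
            · exact h1
            · exact absurd (congrArg PySem.Str.lower (List.mem_singleton.mp h2)) hxa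
          · intro h; exact List.mem_append.mpr (Or.inl h)
        rw [hmu]
        constructor
        · rintro (hu | ⟨hf, hne2⟩)
          · exact Or.inl hu
          · refine Or.inr ⟨hf, ?_⟩
            cases hp : prev with
            | none => simp
            | some p =>
              intro hcontra
              have hpx : p = PySem.Str.lower x := Option.some_injective _ hcontra
              have hxS : x ∈ S := List.mem_of_find?_eq_some hf
              have h1 : PySem.Str.lower x ≤ PySem.Str.lower a :=
                hpx ▸ hprev p hp a (List.mem_cons_self)
              have h2 : PySem.Str.lower a ≤ PySem.Str.lower x := (List.pairwise_cons.mp hS).1 x hxS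
              exact hxa (le_antisymm h1 h2)
        · rintro (hu | ⟨hf, _⟩)
          · exact Or.inl hu
          · refine Or.inr ⟨hf, fun h => hxa (Option.some_injective _ h).symm⟩

-- B's dedup of a sorted list has strictly increasing lowercases
theorem pvBFold_pairwise (S : List String) : ∀ (prev : Option String) (out : List String),
    S.Pairwise (fun x y => PySem.Str.lower x ≤ PySem.Str.lower y) →
    out.Pairwise (fun x y => PySem.Str.lower x < PySem.Str.lower y) →
    (∀ p, prev = some p → (∀ z ∈ out, PySem.Str.lower z ≤ p) ∧ (∀ y ∈ S, p ≤ PySem.Str.lower y)) →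
    (prev = none → out = []) →
    ((S.foldl pvBStep (prev, out)).2).Pairwise (fun x y => PySem.Str.lower x < PySem.Str.lower y) := by
  induction S with
  | nil => intro prev out _ hout _ _; simpa using hout
  | cons a S ih =>
    intro prev out hS hout hprev hnone
    rw [List.foldl_cons]
    by_cases hskip : some (PySem.Str.lower a) = prev
    · rw [show pvBStep (prev, out) a = (prev, out) by simp [pvBStep, hskip]]
      refine ih prev out hS.of_cons hout (fun p hp => ⟨(hprev p hp).1,
        fun y hy => (hprev p hp).2 y (List.mem_cons_of_mem a hy)⟩) hnone
    · rw [show pvBStep (prev, out) a = (some (PySem.Str.lower a), out ++ [a]) by simp [pvBStep, hskip]]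
      have hlt : ∀ z ∈ out, PySem.Str.lower z < PySem.Str.lower a := by
        intro z hz
        cases hp : prev with
        | none => rw [hnone hp] at hz; cases hz
        | some p =>
          have h1 : PySem.Str.lower z ≤ p := (hprev p hp).1 z hz
          have h2 : p ≤ PySem.Str.lower a := (hprev p hp).2 a List.mem_cons_self
          have h3 : p ≠ PySem.Str.lower a := fun he => hskip (by rw [he] at hp; exact hp.symm)
          exact lt_of_le_of_lt h1 (lt_of_le_of_ne h2 h3)
      apply ih
      · exact hS.of_cons
      · rw [List.pairwise_append]
        exact ⟨hout, List.pairwise_singleton _ _, fun z hz y hy => (List.mem_singleton.mp hy) ▸ hlt z hz⟩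
      · rintro p hp
        cases Option.some_injective _ hp.symm
        refine ⟨?_, (List.pairwise_cons.mp hS).1⟩
        intro z hz
        rcases List.mem_append.mp hz with h1 | h2
        · exact le_of_lt (hlt z h1)
        · rw [List.mem_singleton.mp h2]
      · intro h; cases h

-- B's last-element fold equals the prev-tracking fold (the invariant: prev is the last kept lowercase)
theorem pvBLast (S : List String) : ∀ (out : List String),
    S.foldl
      (fun out name =>
        if out = [] ∨ (out.getLast?).map PySem.Str.lower ≠ some (PySem.Str.lower name)
        then out ++ [name] else out) out
    = (S.foldl pvBStep ((out.getLast?).map PySem.Str.lower, out)).2 := by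
  induction S with
  | nil => intro out; rfl
  | cons a S ih =>
    intro out
    rw [List.foldl_cons, List.foldl_cons]
    by_cases h : out = [] ∨ (out.getLast?).map PySem.Str.lower ≠ some (PySem.Str.lower a)
    · rw [if_pos h]
      have hstep : pvBStep ((out.getLast?).map PySem.Str.lower, out) a
          = (some (PySem.Str.lower a), out ++ [a]) := by
        unfold pvBStep
        rw [if_pos ?_]
        rcases h with h | h
        · subst h; simp
        · exact fun he => h he.symm
      rw [hstep, ih (out ++ [a]), List.getLast?_concat]
      rfl
    · rw [if_neg h]
      have heq : (out.getLast?).map PySem.Str.lower = some (PySem.Str.lower a) :=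
        not_ne_iff.mp (not_or.mp h).2
      have hstep : pvBStep ((out.getLast?).map PySem.Str.lower, out) a
          = ((out.getLast?).map PySem.Str.lower, out) := by
        unfold pvBStep
        rw [if_neg (by simp [heq])]
      rw [hstep, ih out]

-- per-key equality: sort-after-dedup (A) = adjacent-dedup-after-sort (B's helper)
theorem pvPerKey (names : List String) :
    PySem.List.sorted ((names.foldl pvAStep ([], [])).2) (fun x => PySem.Str.lower x) false
      = pv_dedup_sorted names := by
  unfold pv_dedup_sorted
  rw [pvBLast]
  have hP := PySem.List.sorted_pairwise names (fun x => PySem.Str.lower x)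
  have hBpw := pvBFold_pairwise (PySem.List.sorted names (fun x => PySem.Str.lower x) false)
    none [] hP List.Pairwise.nil (fun p hp => by cases hp) (fun _ => rfl)
  have hAnd : ((names.foldl pvAStep ([], [])).2).Nodup :=
    (pvAFold_nodup names [] [] (by simp) (by simp)).of_map
  have hBnd : (((PySem.List.sorted names (fun x => PySem.Str.lower x) false).foldl pvBStep (none, [])).2).Nodup :=
    hBpw.imp (fun h he => absurd (he ▸ h) (lt_irrefl _))
  have hmem : ∀ x, x ∈ ((PySem.List.sorted names (fun x => PySem.Str.lower x) false).foldl pvBStep (none, [])).2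
      ↔ x ∈ (names.foldl pvAStep ([], [])).2 := by
    intro x
    rw [pvBFold_mem _ none [] hP (fun p hp => by cases hp) x,
      pvAFold_mem names [] [] (by simp) x]
    simp only [List.not_mem_nil, false_or, not_false_iff, and_true, true_and, ne_eq,
      reduceCtorEq]
    rw [pvSorted_find names (PySem.Str.lower x)]
  exact PySem.List.sorted_eq_of_perm_of_pairwise_lt _ _ _
    ((List.perm_ext_iff_of_nodup hBnd hAnd).mpr hmem) hBpw

-- A's port step equals pvAStep (Set.add on a fresh element is plain append)
theorem pvAStep_eq :
    (fun (st : PySem.Set String × List String) name =>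
      let name_lower := PySem.Str.lower name
      if name_lower ∉ st.1 then (PySem.Set.add st.1 name_lower, st.2 ++ [name]) else st) = pvAStep := by
  funext st name
  unfold pvAStep
  simp only []
  by_cases h : PySem.Str.lower name ∉ st.1
  · simp only [if_pos h, PySem.Set.add_of_not_mem h]
  · simp only [if_neg h]

-- ===== VERDICT (by name: the statement is the Claim_ definition above) =====
theorem clean_and_sort_spec : Claim_equal_clean_and_sort := by
  intro data_dict _
  unfold Spec_clean_and_sort clean_and_sort clean_and_sort_alt
  rw [pvAStep_eq]
  -- the dict comprehension is ofList of the mapped pairs = a fold of inserts over data_dict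
  have hof : PySem.Dict.ofList (data_dict.map (fun kv => (kv.1, pv_dedup_sorted kv.2)))
      = data_dict.foldl
          (fun (d : PySem.Dict String (List String)) kv => d.insert kv.1 (pv_dedup_sorted kv.2))
          PySem.Dict.empty := by
    rw [show PySem.Dict.ofList (data_dict.map (fun kv => (kv.1, pv_dedup_sorted kv.2)))
        = (data_dict.map (fun kv => (kv.1, pv_dedup_sorted kv.2))).foldl
            (fun (d : PySem.Dict String (List String)) p => d.insert p.1 p.2) PySem.Dict.empty from rfl,
      List.foldl_map]
  rw [hof]
  congr 1
  apply PySem.List.foldl_congr_mem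
  intro acc kv _
  show acc.insert kv.1
      (PySem.List.sorted ((kv.2.foldl pvAStep (([] : List String), ([] : List String))).2)
        (fun x => PySem.Str.lower x) false) = _
  rw [pvPerKey kv.2]
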